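-- pv_equiv track=rewrite | github.com/yamaguchigo1923/uruno_ocr_backend | test/label_test/run_label_test.py | pick_widest_table
-- ===== SOURCE A (Python) =====
-- from typing import Any, Dict, List, Tuple, Optional
--
-- def _count_nonempty_columns(table: List[List[str]]) -> int:
--     if not table:
--         return 0
--     max_cols = max((len(r) for r in table), default=0)
--     nonempty = 0
--     for c in range(max_cols):
--         has_val = False
--         for r in table:
--             if c < len(r) and str(r[c]).strip():
--                 has_val = True
--                 break
--         if has_val:
--             nonempty += 1
--     return nonempty
--
-- def pick_widest_table(tables: List[List[List[str]]]) -> List[List[str]]: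
--     """テーブル群から列情報が最もリッチなものを1つ選ぶ。"""
--
--     if not tables:
--         return []
--     best_idx = 0
--     best_score = (-1, -1, -1)  # (nonempty_cols, raw_cols, rows)
--     for i, t in enumerate(tables):
--         rows = len(t)
--         raw_cols = max((len(r) for r in t), default=0)
--         nonempty_cols = _count_nonempty_columns(t)
--         score = (nonempty_cols, raw_cols, rows)
--         if score > best_score:
--             best_score = score
--             best_idx = i
--     return tables[best_idx]
-- ===== SOURCE B (Python) =====
-- def pick_widest_table(tables):
--     """テーブル群から列情報が最もリッチなものを1つ選ぶ。(row-major single pass)"""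
--     if not tables:
--         return []
--
--     def score(t):
--         cols = set()
--         width = 0
--         for r in t:
--             if len(r) > width:
--                 width = len(r)
--             for c, cell in enumerate(r):
--                 if str(cell).strip():
--                     cols.add(c)
--         return (len(cols), width, len(t))
--
--     best_idx = 0
--     best_score = (-1, -1, -1)
--     for i, t in enumerate(tables):
--         s = score(t)
--         if s > best_score:
--             best_score = s
--             best_idx = i
--     return tables[best_idx]
-- ===== Notes on version B (the rewrite author's own statement) =====
-- stated objective: simpler
-- what changed: Replaces the column-major helper (which rescans all rows once per column index) with a single row-major pass per table that collects the set of nonempty column indices and the maximum row width in one sweep; the strict-> first-wins argmax over (nonempty_cols, raw_cols, rows) is kept.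
import Mathlib
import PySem

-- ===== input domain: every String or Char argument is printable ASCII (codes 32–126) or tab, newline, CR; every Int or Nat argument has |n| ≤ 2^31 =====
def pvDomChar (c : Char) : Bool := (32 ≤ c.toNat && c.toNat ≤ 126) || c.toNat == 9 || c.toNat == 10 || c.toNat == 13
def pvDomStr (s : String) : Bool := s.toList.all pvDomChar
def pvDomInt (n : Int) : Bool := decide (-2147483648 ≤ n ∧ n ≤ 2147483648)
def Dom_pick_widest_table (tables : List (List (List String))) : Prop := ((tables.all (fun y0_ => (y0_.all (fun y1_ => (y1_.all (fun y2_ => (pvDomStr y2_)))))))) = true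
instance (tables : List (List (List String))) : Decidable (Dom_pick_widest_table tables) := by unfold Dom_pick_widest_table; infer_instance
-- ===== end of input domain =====

-- B replaces A's column-major nonempty-column helper by a single row-major pass
-- collecting the set of nonempty column indices (objective: simpler, one sweep per table).

-- truthiness of str(cell).strip()
def pvTruthy (s : String) : Bool := !(PySem.Str.strip s == "")

-- Python tuple comparison 'score > best_score' on int triples (lexicographic, strict)
def pyGt3 (a b : Int × Int × Int) : Bool :=
  decide (b.1 < a.1) ||
    (a.1 == b.1 && (decide (b.2.1 < a.2.1) ||
      (a.2.1 == b.2.1 && decide (b.2.2 < a.2.2))))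

-- ===== PORT A =====
def _count_nonempty_columns (table : List (List String)) : Int :=
  if table = [] then 0
  else
    let max_cols : Int := PySem.List.maxD (table.map (fun r => (r.length : Int))) id 0
    (PySem.List.pyRange 0 max_cols 1).foldl
      (fun nonempty c =>
        if table.any (fun r =>
            decide (c < (r.length : Int)) && pvTruthy (PySem.List.pyGetD r c "")) then
          nonempty + 1
        else nonempty) 0

def pick_widest_table (tables : List (List (List String))) : List (List String) :=
  if tables = [] then []
  else
    let res := (PySem.List.enumerate tables).foldl
      (fun (st : Int × (Int × Int × Int)) p =>
        let t := p.2
        let rows : Int := t.length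
        let raw_cols : Int := PySem.List.maxD (t.map (fun r => (r.length : Int))) id 0
        let nonempty_cols := _count_nonempty_columns t
        let score := (nonempty_cols, raw_cols, rows)
        if pyGt3 score st.2 then (p.1, score) else st)
      (0, (-1, -1, -1))
    PySem.List.pyGetD tables res.1 []

-- ===== PORT B =====
-- row-major single pass: set of nonempty column indices + running max row width
def pvScore (t : List (List String)) : Int × Int × Int :=
  match t.foldl
    (fun (st : PySem.Set Int × Int) r =>
      ((PySem.List.enumerate r).foldl
          (fun cs p => if pvTruthy p.2 then PySem.Set.add cs p.1 else cs) st.1,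
       if st.2 < (r.length : Int) then (r.length : Int) else st.2))
    (PySem.Set.empty, 0) with
  | (cols, width) => ((cols.length : Int), width, (t.length : Int))

def pick_widest_table_alt (tables : List (List (List String))) : List (List String) :=
  if tables = [] then []
  else
    let res := (PySem.List.enumerate tables).foldl
      (fun (st : Int × (Int × Int × Int)) p =>
        let s := pvScore p.2
        if pyGt3 s st.2 then (p.1, s) else st)
      (0, (-1, -1, -1))
    PySem.List.pyGetD tables res.1 []

-- ===== PRECONDITION & SPEC =====
def Spec_pick_widest_table (tables : List (List (List String))) (out : List (List String)) : Prop := out = pick_widest_table_alt tables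
instance (tables : List (List (List String))) (out : List (List String)) : Decidable (Spec_pick_widest_table tables out) := by unfold Spec_pick_widest_table; infer_instance

-- ===== CLAIM (what is proved, stated in full; the proofs are below) =====
def Claim_equal_pick_widest_table : Prop := ∀ (tables : List (List (List String))), Dom_pick_widest_table tables → Spec_pick_widest_table tables (pick_widest_table tables)

-- ===== LEMMAS AND PROOFS =====

-- Python max(..., default=0) over nonnegative ints = running max from 0
theorem pv_maxD_eq_foldl (xs : List Int) (h : ∀ x ∈ xs, 0 ≤ x) :
    PySem.List.maxD xs id 0 = xs.foldl max 0 := by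
  cases xs with
  | nil => rfl
  | cons x r =>
    have hx : 0 ≤ x := h x (by simp)
    simp only [PySem.List.maxD, PySem.List.max?, List.foldl_cons, max_eq_right hx]
    clear h hx
    induction r generalizing x with
    | nil => rfl
    | cons y s ih =>
        simp only [List.foldl_cons, id]
        rcases lt_or_ge x y with hxy | hxy
        · rw [if_pos hxy, max_eq_right hxy.le]
          exact ih y
        · rw [if_neg (not_lt.mpr hxy), max_eq_left hxy]
          exact ih x

-- one row of B's pass, set-theoretically
def pvRowStep (cs : PySem.Set Int) (r : List String) : PySem.Set Int :=
  (PySem.List.enumerate r).foldl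
    (fun cs p => if pvTruthy p.2 then PySem.Set.add cs p.1 else cs) cs

theorem pvRowStep_eq_update (cs : PySem.Set Int) (r : List String) :
    pvRowStep cs r =
      PySem.Set.update cs
        (((PySem.List.enumerate r).filter (fun p => pvTruthy p.2)).map (·.1)) := by
  unfold pvRowStep
  rw [PySem.List.foldl_if_eq_foldl_filter (p := fun p => pvTruthy p.2)
        (f := fun cs (p : Int × String) => PySem.Set.add cs p.1)]
  rw [← List.foldl_map (f := fun (p : Int × String) => p.1) (g := PySem.Set.add)]
  rfl

theorem pv_mem_rowStep (cs : PySem.Set Int) (r : List String) (c : Int) :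
    c ∈ pvRowStep cs r ↔
      c ∈ cs ∨ ∃ (k : Nat), ∃ (_ : k < r.length), c = (k : Int) ∧ pvTruthy r[k] = true := by
  rw [pvRowStep_eq_update, PySem.Set.mem_update]
  constructor
  · rintro (h | h)
    · exact Or.inl h
    · rcases List.mem_map.mp h with ⟨p, hp, rfl⟩
      rcases List.mem_filter.mp hp with ⟨hpe, hpt⟩
      rcases (PySem.List.mem_enumerate_iff r 0 p).mp hpe with ⟨k, hk, rfl⟩
      exact Or.inr ⟨k, hk, by simp, hpt⟩
  · rintro (h | ⟨k, hk, rfl, ht⟩)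
    · exact Or.inl h
    · refine Or.inr (List.mem_map.mpr ⟨((k : Int), r[k]), List.mem_filter.mpr ⟨?_, ht⟩, rfl⟩)
      exact (PySem.List.mem_enumerate_iff r 0 _).mpr ⟨k, hk, by simp⟩

theorem pv_nodup_rowStep (cs : PySem.Set Int) (r : List String) (h : cs.Nodup) :
    (pvRowStep cs r).Nodup := by
  rw [pvRowStep_eq_update]; exact PySem.Set.nodup_update _ _ h

theorem pv_mem_setfold (t : List (List String)) (cs : PySem.Set Int) (c : Int) :
    c ∈ t.foldl pvRowStep cs ↔
      c ∈ cs ∨ ∃ r ∈ t, ∃ (k : Nat), ∃ (_ : k < r.length), c = (k : Int) ∧ pvTruthy r[k] = true := by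
  induction t generalizing cs with
  | nil => simp
  | cons r rest ih =>
      rw [List.foldl_cons, ih, pv_mem_rowStep]
      constructor
      · rintro ((h | ⟨k, hk, rfl, ht⟩) | ⟨r', hr', hx⟩)
        · exact Or.inl h
        · exact Or.inr ⟨r, by simp, k, hk, rfl, ht⟩
        · exact Or.inr ⟨r', by simp [hr'], hx⟩
      · rintro (h | ⟨r', hr', hx⟩)
        · exact Or.inl (Or.inl h)
        · rcases List.mem_cons.mp hr' with rfl | hr'
          · exact Or.inl (Or.inr hx)
          · exact Or.inr ⟨r', hr', hx⟩

theorem pv_nodup_setfold (t : List (List String)) (cs : PySem.Set Int) (h : cs.Nodup) :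
    (t.foldl pvRowStep cs).Nodup := by
  induction t generalizing cs with
  | nil => exact h
  | cons r rest ih => exact ih _ (pv_nodup_rowStep _ _ h)

-- A's nonempty-column count = size of B's set of nonempty column indices
theorem pv_count_eq (t : List (List String)) :
    _count_nonempty_columns t = ((t.foldl pvRowStep PySem.Set.empty).length : Int) := by
  by_cases ht : t = []
  · subst ht; rfl
  · unfold _count_nonempty_columns
    simp only [ht, if_false]
    set M : Int := PySem.List.maxD (t.map (fun r => (r.length : Int))) id 0 with hM
    have hMf : M = (t.map (fun r => (r.length : Int))).foldl max 0 := by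
      rw [hM, pv_maxD_eq_foldl]
      intro x hx
      rcases List.mem_map.mp hx with ⟨r, _, rfl⟩
      exact Int.natCast_nonneg _
    have hbound : ∀ r ∈ t, (r.length : Int) ≤ M := by
      intro r hr
      rw [hMf]
      exact (PySem.List.le_foldl_max _ 0).2 _ (List.mem_map.mpr ⟨r, hr, rfl⟩)
    set QA : Int → Bool := fun c => t.any (fun r =>
        decide (c < (r.length : Int)) && pvTruthy (PySem.List.pyGetD r c "")) with hQA
    rw [PySem.List.foldl_if_add_one (p := QA)]
    rw [List.countP_eq_length_filter]
    have hperm : ((PySem.List.pyRange 0 M 1).filter QA).Perm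
        (t.foldl pvRowStep PySem.Set.empty) := by
      rw [List.perm_ext_iff_of_nodup
            (List.Nodup.filter QA (PySem.List.nodup_pyRange_one 0 M))
            (pv_nodup_setfold t _ (show (PySem.Set.empty : PySem.Set Int).Nodup from List.nodup_nil))]
      intro c
      rw [List.mem_filter, PySem.List.mem_pyRange_one, pv_mem_setfold]
      constructor
      · rintro ⟨⟨h0, _⟩, hq⟩
        rcases List.any_eq_true.mp hq with ⟨r, hr, hrc⟩
        simp only [Bool.and_eq_true] at hrc
        obtain ⟨hlt, htr⟩ := hrc
        have hlt' : c < (r.length : Int) := of_decide_eq_true hlt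
        have hget : PySem.List.pyGetD r c "" = r.getD c.toNat "" := by
          conv_lhs => rw [(Int.toNat_of_nonneg h0).symm]
          exact PySem.List.pyGetD_natCast r c.toNat ""
        refine Or.inr ⟨r, hr, c.toNat, by omega, by omega, ?_⟩
        rw [List.getD_eq_getElem _ _ (by omega)] at hget
        rwa [hget] at htr
      · rintro (h | ⟨r, hr, k, hk, rfl, htr⟩)
        · exact absurd h (show c ∉ (PySem.Set.empty : PySem.Set Int) from List.not_mem_nil)
        · have hkM : (k : Int) < M := lt_of_lt_of_le (by exact_mod_cast hk) (hbound r hr)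
          refine ⟨⟨by omega, hkM⟩, ?_⟩
          refine List.any_eq_true.mpr ⟨r, hr, ?_⟩
          simp only [Bool.and_eq_true]
          refine ⟨decide_eq_true (by exact_mod_cast hk), ?_⟩
          rw [PySem.List.pyGetD_natCast, List.getD_eq_getElem _ _ hk]
          exact htr
    rw [hperm.length_eq]
    ring

-- B's one-pass score = A's (nonempty_cols, raw_cols, rows)
theorem pvScore_eq (t : List (List String)) :
    pvScore t = (_count_nonempty_columns t,
                 PySem.List.maxD (t.map (fun r => (r.length : Int))) id 0,
                 (t.length : Int)) := by
  unfold pvScore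
  rw [show (fun (st : PySem.Set Int × Int) (r : List String) =>
      ((PySem.List.enumerate r).foldl
          (fun cs p => if pvTruthy p.2 then PySem.Set.add cs p.1 else cs) st.1,
       if st.2 < (r.length : Int) then (r.length : Int) else st.2))
    = (fun (st : PySem.Set Int × Int) (r : List String) =>
        (pvRowStep st.1 r, if st.2 < (r.length : Int) then (r.length : Int) else st.2)) from rfl]
  rw [PySem.List.foldl_prod_mk
        (f := fun cs r => pvRowStep cs r)
        (g := fun w (r : List String) => if w < (r.length : Int) then (r.length : Int) else w)]
  simp only
  congr 1
  · rw [show (fun (cs : PySem.Set Int) (r : List String) => pvRowStep cs r) = pvRowStep from rfl,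
        pv_count_eq]
  · congr 1
    rw [pv_maxD_eq_foldl _ (by rintro x hx; rcases List.mem_map.mp hx with ⟨r, _, rfl⟩; exact Int.natCast_nonneg _)]
    rw [show (fun (w : Int) (r : List String) => if w < (r.length : Int) then (r.length : Int) else w)
          = fun w r => max w (r.length : Int) from
        funext fun w => funext fun r => by
          rcases lt_or_ge w (r.length : Int) with h | h
          · simp [h, max_eq_right h.le]
          · simp [not_lt.mpr h, max_eq_left h]]
    rw [← List.foldl_map (f := fun r : List String => (r.length : Int)) (g := max)]

-- ===== VERDICT (by name: the statement is the Claim_ definition above) =====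
theorem pick_widest_table_spec : Claim_equal_pick_widest_table := by
  intro tables _
  unfold Spec_pick_widest_table pick_widest_table pick_widest_table_alt
  by_cases h : tables = []
  · simp [h]
  · simp only [h, if_false, pvScore_eq]
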